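-- pv_equiv track=rewrite | github.com/cff29546/pzmap2dzi | main.py | get_dep
-- ===== SOURCE A (Python) =====
-- def get_dep(conf, maps, names):
--     dep = set([])
--     if conf.get('use_depend_texture_only'):
--         used = list(names)  # copy
--         while len(used) > 0:
--             m = used.pop()
--             if m in maps and m not in dep:
--                 dep.add(m)
--                 used.extend(maps[m].get('depend', []))
--     else:
--         dep = set(maps.keys())
--     return dep
-- ===== SOURCE B (Python) =====
-- def get_dep(conf, maps, names):
--     # Recursive DFS with a visited set instead of A's explicit while/stack loop.
--     # Iterating seeds and dependency lists in reverse visits nodes in the same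
--     # order as A's pop-from-the-end stack; the returned set is the same either way.
--     if not conf.get('use_depend_texture_only'):
--         return set(maps.keys())
--     dep = set()
--
--     def visit(m):
--         if m in maps and m not in dep:
--             dep.add(m)
--             for d in reversed(maps[m].get('depend', [])):
--                 visit(d)
--
--     for n in reversed(names):
--         visit(n)
--     return dep
-- ===== Notes on version B (the rewrite author's own statement) =====
-- stated objective: alternative
-- what changed: A's iterative while-loop with an explicit worklist stack is replaced by a recursive depth-first visit with a visited set (guard and else-branch kept); B computes the same reachable set.
import Mathlib
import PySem

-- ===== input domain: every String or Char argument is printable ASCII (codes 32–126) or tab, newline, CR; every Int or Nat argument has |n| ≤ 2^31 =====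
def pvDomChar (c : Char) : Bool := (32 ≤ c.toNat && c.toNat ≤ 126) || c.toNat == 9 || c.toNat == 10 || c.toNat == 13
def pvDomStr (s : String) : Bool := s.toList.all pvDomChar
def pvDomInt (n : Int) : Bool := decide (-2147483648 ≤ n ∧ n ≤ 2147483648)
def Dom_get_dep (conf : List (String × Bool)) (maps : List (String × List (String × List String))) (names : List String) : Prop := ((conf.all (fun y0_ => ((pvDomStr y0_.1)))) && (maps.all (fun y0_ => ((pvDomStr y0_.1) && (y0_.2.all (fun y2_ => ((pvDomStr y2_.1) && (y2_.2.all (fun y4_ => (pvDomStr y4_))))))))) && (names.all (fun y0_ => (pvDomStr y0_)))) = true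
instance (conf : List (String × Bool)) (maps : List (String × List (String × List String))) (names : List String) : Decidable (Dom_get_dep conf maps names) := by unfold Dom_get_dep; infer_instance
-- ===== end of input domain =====

-- B replaces A's while-loop over an explicit worklist stack by a recursive depth-first
-- visit with a visited set (guard and else-branch kept; reverse iteration keeps the visit
-- order of A's pop-from-the-end stack); same returned set, objective: alternative.

-- ===== PORT A =====
-- maps[m].get('depend', [])
def pvDepends (maps : List (String × List (String × List String))) (m : String) : List String :=
  PySem.Dict.getD (PySem.Dict.mk ((PySem.Dict.mk maps).getD m [])) "depend" []

-- `if m in maps and m not in dep` as facts about the input (used by the loop's termination)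
lemma guard_facts (maps : List (String × List (String × List String))) {dep : List String} {m : String}
    (h : ((PySem.Dict.mk maps).contains m && !(PySem.Set.contains dep m)) = true) :
    m ∈ maps.map Prod.fst ∧ m ∉ dep := by
  have h' : (∃ x, (m, x) ∈ maps) ∧ m ∉ dep := by simpa [PySem.Set.contains] using h
  exact ⟨List.mem_map.mpr ⟨(m, h'.1.choose), h'.1.choose_spec, rfl⟩, h'.2⟩

-- number of map keys not yet visited (the loop's termination measure)
def pvMu (maps : List (String × List (String × List String))) (dep : List String) : Nat :=
  (((maps.map Prod.fst).toFinset) \ dep.toFinset).card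

lemma setAdd_eq_append {dep : List String} {m : String} (h : m ∉ dep) :
    PySem.Set.add dep m = dep ++ [m] := by
  simp [PySem.Set.add, PySem.Set.contains, h]

lemma pvMu_add_lt (maps : List (String × List (String × List String))) {dep : List String} {m : String}
    (hm : m ∈ maps.map Prod.fst) (hnd : m ∉ dep) :
    pvMu maps (dep ++ [m]) < pvMu maps dep := by
  unfold pvMu
  have : ((maps.map Prod.fst).toFinset \ (dep ++ [m]).toFinset) =
      ((maps.map Prod.fst).toFinset \ dep.toFinset).erase m := by
    ext x
    simp [Finset.mem_sdiff, Finset.mem_erase, List.mem_toFinset]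
    tauto
  rw [this]
  exact Finset.card_erase_lt_of_mem (by simp [Finset.mem_sdiff, hm, hnd])

-- the while-loop: m = used.pop(); if m in maps and m not in dep: dep.add(m); used.extend(depend)
def getDepLoop (maps : List (String × List (String × List String))) (dep used : List String) : List String :=
  match h : PySem.List.pop? used with
  | none => dep
  | some (m, rest) =>
    if (PySem.Dict.mk maps).contains m && !(PySem.Set.contains dep m) then
      getDepLoop maps (PySem.Set.add dep m) (rest ++ pvDepends maps m)
    else
      getDepLoop maps dep rest
termination_by (pvMu maps dep, used.length)
decreasing_by
  · apply Prod.Lex.left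
    rename_i hg
    obtain ⟨hm, hnd⟩ := guard_facts maps hg
    rw [setAdd_eq_append hnd]
    exact pvMu_add_lt maps hm hnd
  · apply Prod.Lex.right
    have h2 := PySem.List.length_of_pop?_eq_some used h
    simp at h2
    omega

def get_dep (conf : List (String × Bool)) (maps : List (String × List (String × List String))) (names : List String) : List String :=
  if ((PySem.Dict.mk conf).get? "use_depend_texture_only").getD false then
    getDepLoop maps PySem.Set.empty names
  else
    PySem.Set.ofList ((PySem.Dict.mk maps).keys)

-- ===== PORT B =====
-- visit(m): if m in maps and m not in dep: dep.add(m); for d in reversed(depend): visit(d)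
-- (the fuel only makes the recursion total; maps.length + 1 always suffices, proved below)
def visitDep (maps : List (String × List (String × List String))) : Nat → List String → String → List String
  | 0, dep, _ => dep
  | Nat.succ f, dep, m =>
    if (PySem.Dict.mk maps).contains m && !(PySem.Set.contains dep m) then
      ((pvDepends maps m).reverse).foldl (fun dep d => visitDep maps f dep d) (PySem.Set.add dep m)
    else dep

def get_dep_alt (conf : List (String × Bool)) (maps : List (String × List (String × List String))) (names : List String) : List String :=
  if ((PySem.Dict.mk conf).get? "use_depend_texture_only").getD false then
    names.reverse.foldl (fun dep n => visitDep maps (maps.length + 1) dep n) PySem.Set.empty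
  else
    PySem.Set.ofList ((PySem.Dict.mk maps).keys)

-- ===== PRECONDITION & SPEC =====
def Spec_get_dep (conf : List (String × Bool)) (maps : List (String × List (String × List String))) (names : List String) (out : List String) : Prop := out = get_dep_alt conf maps names
instance (conf : List (String × Bool)) (maps : List (String × List (String × List String))) (names : List String) (out : List String) : Decidable (Spec_get_dep conf maps names out) := by unfold Spec_get_dep; infer_instance

-- ===== CLAIM (what is proved, stated in full; the proofs are below) =====
def Claim_equal_get_dep : Prop := ∀ (conf : List (String × Bool)) (maps : List (String × List (String × List String))) (names : List String), Dom_get_dep conf maps names → Spec_get_dep conf maps names (get_dep conf maps names)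

-- ===== LEMMAS AND PROOFS =====

lemma pop?_last_inv {α : Type} {used rest : List α} {m : α}
    (h : PySem.List.pop? used = some (m, rest)) : used = rest ++ [m] := by
  rcases List.eq_nil_or_concat used with rfl | ⟨ys, y, hy⟩
  · simp [PySem.List.pop?] at h
  · subst hy
    rw [List.concat_eq_append, PySem.List.pop?_last] at h
    cases Option.some.inj h
    simp

lemma pvMu_le_of_prefix (maps : List (String × List (String × List String))) {dep dep' : List String}
    (h : dep <+: dep') : pvMu maps dep' ≤ pvMu maps dep := by
  apply Finset.card_le_card
  intro x hx
  simp only [Finset.mem_sdiff, List.mem_toFinset] at hx ⊢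
  exact ⟨hx.1, fun hmem => hx.2 (h.subset hmem)⟩

lemma visitDep_prefix (maps : List (String × List (String × List String))) :
    ∀ (f : Nat) (dep : List String) (m : String), dep <+: visitDep maps f dep m := by
  intro f
  induction f with
  | zero => intro dep m; exact List.prefix_rfl
  | succ f ih =>
    have fold : ∀ (l : List String) (dep : List String),
        dep <+: l.foldl (fun dep d => visitDep maps f dep d) dep := by
      intro l
      induction l with
      | nil => intro dep; exact List.prefix_rfl
      | cons d l ihl =>
        intro dep
        simp only [List.foldl_cons]
        exact (ih dep d).trans (ihl _)
    intro dep m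
    simp only [visitDep]
    split
    · refine List.IsPrefix.trans ?_ (fold _ _)
      unfold PySem.Set.add
      split
      · exact List.prefix_rfl
      · exact List.prefix_append _ _
    · exact List.prefix_rfl

lemma visitDep_fuel (maps : List (String × List (String × List String))) :
    ∀ (f f' : Nat) (dep : List String) (m : String),
      pvMu maps dep < f → pvMu maps dep < f' →
      visitDep maps f dep m = visitDep maps f' dep m := by
  intro f
  induction f with
  | zero => intro f' dep m h _; omega
  | succ f ih =>
    intro f' dep m hf hf'
    match f' with
    | 0 => omega
    | Nat.succ f'' =>
      simp only [visitDep]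
      split
      · next hg =>
        obtain ⟨hm, hnd⟩ := guard_facts maps hg
        have hmu : pvMu maps (PySem.Set.add dep m) < pvMu maps dep := by
          rw [setAdd_eq_append hnd]; exact pvMu_add_lt maps hm hnd
        have fold : ∀ (l : List String) (dep₂ : List String),
            pvMu maps dep₂ < f → pvMu maps dep₂ < f'' →
            l.foldl (fun dep d => visitDep maps f dep d) dep₂ =
            l.foldl (fun dep d => visitDep maps f'' dep d) dep₂ := by
          intro l
          induction l with
          | nil => intro dep₂ _ _; rfl
          | cons d l ihl =>
            intro dep₂ h1 h2
            simp only [List.foldl_cons]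
            rw [← ih f'' dep₂ d h1 h2]
            have hle := pvMu_le_of_prefix maps (visitDep_prefix maps f dep₂ d)
            exact ihl _ (by omega) (by omega)
        exact fold _ _ (by omega) (by omega)
      · rfl

lemma visitDep_not_guard (maps : List (String × List (String × List String))) {dep : List String} {m : String}
    (h : ¬ ((PySem.Dict.mk maps).contains m && !(PySem.Set.contains dep m)) = true)
    (f : Nat) : visitDep maps f dep m = dep := by
  cases f with
  | zero => rfl
  | succ f => simp only [visitDep]; rw [if_neg h]

lemma getDepLoop_eq_visit (maps : List (String × List (String × List String))) :
    ∀ (dep used : List String) (f : Nat), pvMu maps dep < f →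
      getDepLoop maps dep used =
        used.reverse.foldl (fun dep n => visitDep maps f dep n) dep := by
  intro dep used
  fun_induction getDepLoop maps dep used with
  | case1 dep used hpop =>
    intro f _
    have : used = [] := by
      rcases List.eq_nil_or_concat used with rfl | ⟨ys, y, hy⟩
      · rfl
      · subst hy; rw [List.concat_eq_append, PySem.List.pop?_last] at hpop
        exact absurd hpop (by simp)
    simp [this]
  | case2 dep used m rest hpop hg ih =>
    intro f hf
    have hused : used = rest ++ [m] := pop?_last_inv hpop
    obtain ⟨hm, hnd⟩ := guard_facts maps hg
    have hmu : pvMu maps (PySem.Set.add dep m) < pvMu maps dep := by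
      rw [setAdd_eq_append hnd]; exact pvMu_add_lt maps hm hnd
    match f with
    | 0 => omega
    | Nat.succ f' =>
      rw [ih (Nat.succ f') (by omega)]
      subst hused
      rw [List.reverse_append, List.foldl_append, List.reverse_append, List.foldl_append]
      simp only [List.reverse_singleton, List.singleton_append, List.foldl_cons, List.foldl_nil]
      congr 1
      show ((pvDepends maps m).reverse).foldl (fun dep n => visitDep maps (Nat.succ f') dep n) (PySem.Set.add dep m) =
        visitDep maps (Nat.succ f') dep m
      conv_rhs => rw [visitDep]
      rw [if_pos hg]
      have fold : ∀ (l : List String) (dep₂ : List String),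
          pvMu maps dep₂ < f' →
          l.foldl (fun dep d => visitDep maps (Nat.succ f') dep d) dep₂ =
          l.foldl (fun dep d => visitDep maps f' dep d) dep₂ := by
        intro l
        induction l with
        | nil => intro dep₂ _; rfl
        | cons d l ihl =>
          intro dep₂ h1
          simp only [List.foldl_cons]
          rw [visitDep_fuel maps (Nat.succ f') f' dep₂ d (by omega) h1]
          have hle := pvMu_le_of_prefix maps (visitDep_prefix maps f' dep₂ d)
          exact ihl _ (by omega)
      exact fold _ _ (by omega)
  | case3 dep used m rest hpop hg ih =>
    intro f hf
    have hused : used = rest ++ [m] := pop?_last_inv hpop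
    rw [ih f hf]
    subst hused
    rw [List.reverse_append]
    simp only [List.reverse_singleton, List.singleton_append, List.foldl_cons]
    rw [visitDep_not_guard maps hg f]

-- ===== VERDICT (by name: the statement is the Claim_ definition above) =====
theorem get_dep_spec : Claim_equal_get_dep := by
  unfold Claim_equal_get_dep
  intro conf maps names _
  unfold Spec_get_dep get_dep get_dep_alt
  split
  · apply getDepLoop_eq_visit
    have h1 : pvMu maps PySem.Set.empty ≤ (maps.map Prod.fst).length := by
      calc pvMu maps PySem.Set.empty
          ≤ ((maps.map Prod.fst).toFinset).card := Finset.card_le_card Finset.sdiff_subset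
        _ ≤ (maps.map Prod.fst).length := List.toFinset_card_le _
    simp only [List.length_map] at h1
    omega
  · rfl
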